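-- pv_equiv track=rewrite | github.com/pasmargo/t2t-qa | qald/align_max.py | get_max_contiguous
-- ===== SOURCE A (Python) =====
-- import itertools
--
-- def get_max_contiguous(alignment, alignments):
--   """
--   Given a sequence, it returns the maximum-length
--   contiguous sequence. E.g.:
--   For [1,3,4], returns [3,4].
--   For [1,2,3], returns [1,2,3].
--   If there are ties, it returns the right-most sequence (this is arbitrary).
--   For [1,2,4,5], returns [4,5].
--   For [1,2,3,6,7,8], returns [6,7,8].
--   """
--   if not alignment:
--     return alignment
--   alignment = sorted(alignment)
--   range_len = alignment[-1] - alignment[0]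
--   if not (range_len > len(alignment) - 1):
--     return alignment
--   aligned_src_inds = set(itertools.chain(*alignments))
--   # Get all contiguous segments in a list of tuples,
--   # where each tuple has the start and end index of
--   # each contiguous sequence.
--   solutions = []
--   starti, endi = 0, 0
--   prev = alignment[0]
--   for i in range(1, len(alignment)):
--     a = alignment[i]
--     if any([u in aligned_src_inds for u in range(prev+1, a)]):
--       solutions.append((starti, endi))
--       starti, endi = i, i
--     else:
--       # case: a - prev == 1, and unaligned words in the range.
--       endi = i
--     prev = a
--   else:
--     solutions.append((starti, endi))
--   # Get the longest contiguous sequence.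
--   longest = -1
--   longesti = None
--   for i, (starti, endi) in enumerate(solutions):
--     if endi - starti >= longest:
--       longest = endi - starti
--       longesti = i
--   starti, endi = solutions[longesti]
--   return alignment[starti:endi+1]
-- ===== SOURCE B (Python) =====
-- import itertools
-- from bisect import bisect_right
--
-- def get_max_contiguous(alignment, alignments):
--   """Same result as A: sorted alignment's longest 'contiguous' run (right-most on
--   ties), where a gap between consecutive entries breaks the run only if some
--   aligned source index lies strictly inside it.  Instead of scanning every
--   integer of every gap, keep the aligned indices as a sorted list and test gap
--   emptiness with one bisection."""
--   if not alignment: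
--     return alignment
--   srt = sorted(alignment)
--   if srt[-1] - srt[0] <= len(srt) - 1:
--     return srt
--   aligned = sorted(set(itertools.chain(*alignments)))
--   best_s, best_e, s = 0, 0, 0
--   for i in range(1, len(srt)):
--     prev = srt[i - 1]
--     j = bisect_right(aligned, prev)
--     if j < len(aligned) and aligned[j] < srt[i]:
--       if (i - 1) - s >= best_e - best_s:
--         best_s, best_e = s, i - 1
--       s = i
--   if (len(srt) - 1) - s >= best_e - best_s:
--     best_s, best_e = s, len(srt) - 1
--   return srt[best_s:best_e + 1]
-- ===== Notes on version B (the rewrite author's own statement) =====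
-- stated objective: faster
-- what changed: Replaces A's per-gap membership scan (any(u in set) over every integer strictly between consecutive sorted entries) and its two-pass segment-list-then-argmax selection with a sorted aligned-index list queried by one bisect_right per gap and a single online right-most-tie argmax, so no gap is ever enumerated.
import Mathlib
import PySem

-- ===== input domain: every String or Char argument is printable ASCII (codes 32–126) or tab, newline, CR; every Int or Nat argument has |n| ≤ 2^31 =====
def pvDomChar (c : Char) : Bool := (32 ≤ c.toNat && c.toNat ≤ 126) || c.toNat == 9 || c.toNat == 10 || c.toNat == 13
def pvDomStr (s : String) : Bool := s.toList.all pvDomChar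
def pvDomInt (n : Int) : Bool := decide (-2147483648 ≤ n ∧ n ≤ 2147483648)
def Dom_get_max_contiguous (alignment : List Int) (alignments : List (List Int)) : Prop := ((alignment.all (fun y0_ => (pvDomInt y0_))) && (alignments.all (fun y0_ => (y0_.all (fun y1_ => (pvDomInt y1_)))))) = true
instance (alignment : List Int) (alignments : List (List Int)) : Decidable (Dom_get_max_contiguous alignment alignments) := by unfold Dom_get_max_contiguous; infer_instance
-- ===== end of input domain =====

-- B replaces A's per-gap integer scan and two-pass segment/argmax selection by one
-- bisect_right per adjacent pair on the sorted aligned-index list with an online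
-- right-most-tie argmax (objective: faster — no gap is ever enumerated).


-- ===== PORT A =====
-- loop body of A's segment scan: state (solutions, starti, endi, prev)
def gmcStepA (aligned : PySem.Set Int) (al : List Int)
    (st : List (Int × Int) × Int × Int × Int) (i : Int) :
    List (Int × Int) × Int × Int × Int :=
  let a := PySem.List.pyGetD al i 0
  if (PySem.List.pyRange (st.2.2.2 + 1) a).any (fun u => PySem.Set.contains aligned u) then
    (st.1 ++ [(st.2.1, st.2.2.1)], i, i, a)
  else
    (st.1, st.2.1, i, a)

-- loop body of A's longest-segment selection: state (longest, longesti)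
def gmcSelStep (acc : Int × Option Int) (p : Int × (Int × Int)) : Int × Option Int :=
  if p.2.2 - p.2.1 ≥ acc.1 then (p.2.2 - p.2.1, some p.1) else acc

def get_max_contiguous (alignment : List Int) (alignments : List (List Int)) : List Int :=
  if alignment = [] then alignment
  else
    let al := PySem.List.sorted alignment (fun x => x) false
    let range_len := PySem.List.pyGetD al (-1) 0 - PySem.List.pyGetD al 0 0
    if ¬ (range_len > (al.length : Int) - 1) then al
    else
      let aligned_src_inds : PySem.Set Int := PySem.Set.ofList alignments.flatten
      let st := (PySem.List.pyRange 1 (al.length : Int)).foldl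
        (gmcStepA aligned_src_inds al) ([], 0, 0, PySem.List.pyGetD al 0 0)
      let sols := st.1 ++ [(st.2.1, st.2.2.1)]
      let fin := (PySem.List.enumerate sols).foldl gmcSelStep (-1, none)
      match fin.2 with
      | none => []   -- unreachable: sols is nonempty, so longesti has been set
      | some j =>
        let se := PySem.List.pyGetD sols j (0, 0)
        PySem.List.slice al (some se.1) (some (se.2 + 1))

-- ===== PORT B =====
-- loop body of B's single pass: state (best_s, best_e, s)
def gmcStepB (aligned : List Int) (srt : List Int) (st : Int × Int × Int) (i : Int) :
    Int × Int × Int :=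
  let prev := PySem.List.pyGetD srt (i - 1) 0
  let j := PySem.List.bisectRight aligned prev
  if (j : Int) < (aligned.length : Int) ∧
      PySem.List.pyGetD aligned (j : Int) 0 < PySem.List.pyGetD srt i 0 then
    if (i - 1) - st.2.2 ≥ st.2.1 - st.1 then (st.2.2, i - 1, i) else (st.1, st.2.1, i)
  else st

def get_max_contiguous_alt (alignment : List Int) (alignments : List (List Int)) : List Int :=
  if alignment = [] then alignment
  else
    let srt := PySem.List.sorted alignment (fun x => x) false
    if PySem.List.pyGetD srt (-1) 0 - PySem.List.pyGetD srt 0 0 ≤ (srt.length : Int) - 1 then srt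
    else
      let aligned := PySem.List.sorted (PySem.Set.ofList alignments.flatten) (fun x => x) false
      let st := (PySem.List.pyRange 1 (srt.length : Int)).foldl (gmcStepB aligned srt) (0, 0, 0)
      let best := if ((srt.length : Int) - 1) - st.2.2 ≥ st.2.1 - st.1
        then (st.2.2, (srt.length : Int) - 1) else (st.1, st.2.1)
      PySem.List.slice srt (some best.1) (some (best.2 + 1))

-- ===== PRECONDITION & SPEC =====
def Spec_get_max_contiguous (alignment : List Int) (alignments : List (List Int)) (out : List Int) : Prop := out = get_max_contiguous_alt alignment alignments
instance (alignment : List Int) (alignments : List (List Int)) (out : List Int) : Decidable (Spec_get_max_contiguous alignment alignments out) := by unfold Spec_get_max_contiguous; infer_instance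

-- ===== CLAIM (what is proved, stated in full; the proofs are below) =====
def Claim_equal_get_max_contiguous : Prop := ∀ (alignment : List Int) (alignments : List (List Int)), Dom_get_max_contiguous alignment alignments → Spec_get_max_contiguous alignment alignments (get_max_contiguous alignment alignments)

-- ===== LEMMAS AND PROOFS =====

-- the right-most-tie "better segment" step both programs' selections reduce to
def gmcArg (b p : Int × Int) : Int × Int := if p.2 - p.1 ≥ b.2 - b.1 then p else b

-- A's scan of the integers strictly between prev and a equals B's bisection test,
-- for any sorted list L with the same members as F.
lemma gmc_break_iff (F L : List Int) (prev a : Int)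
    (hs : L.Pairwise (· ≤ ·)) (hm : ∀ x, x ∈ L ↔ x ∈ F) :
    ((PySem.List.pyRange (prev + 1) a).any
        (fun u => PySem.Set.contains (PySem.Set.ofList F) u) = true)
    ↔ (((PySem.List.bisectRight L prev : Nat) : Int) < (L.length : Int) ∧
        PySem.List.pyGetD L ((PySem.List.bisectRight L prev : Nat) : Int) 0 < a) := by
  obtain ⟨hle, hlo, hhi⟩ := PySem.List.bisectRight_spec L prev hs
  set j := PySem.List.bisectRight L prev with hj
  rw [PySem.List.pyGetD_natCast]
  constructor
  · intro h
    simp only [List.any_eq_true] at h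
    obtain ⟨u, hu, hc⟩ := h
    rw [PySem.Set.contains_iff, PySem.Set.mem_ofList] at hc
    rw [PySem.List.mem_pyRange_one] at hu
    have huL : u ∈ L := (hm u).2 hc
    obtain ⟨k, hk, hkeq⟩ := List.mem_iff_getElem.mp huL
    have hjk : j ≤ k := by
      by_contra hlt
      have := hlo k hk (by omega)
      omega
    have hjlen : j < L.length := lt_of_le_of_lt hjk hk
    refine ⟨by exact_mod_cast hjlen, ?_⟩
    rw [List.getD_eq_getElem L 0 hjlen]
    have hmono : L[j] ≤ L[k] := by
      rcases eq_or_lt_of_le hjk with heq | hlt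
      · simp [heq]
      · exact List.pairwise_iff_getElem.mp hs j k hjlen hk hlt
    omega
  · rintro ⟨hjlen', hja⟩
    have hjlen : j < L.length := by exact_mod_cast hjlen'
    rw [List.getD_eq_getElem L 0 hjlen] at hja
    have hgt : prev < L[j] := hhi j hjlen le_rfl
    simp only [List.any_eq_true]
    refine ⟨L[j], ?_, ?_⟩
    · rw [PySem.List.mem_pyRange_one]; omega
    · rw [PySem.Set.contains_iff, PySem.Set.mem_ofList]
      exact (hm _).1 (List.getElem_mem hjlen)

-- the two loops, run side by side over range(k, k+m) from related states
lemma gmc_loop (al L F : List Int)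
    (hs : L.Pairwise (· ≤ ·)) (hm : ∀ x, x ∈ L ↔ x ∈ F) :
    ∀ (m : Nat) (k s : Int) (sols : List (Int × Int)),
    1 ≤ k → 0 ≤ s → s ≤ k - 1 → (∀ p ∈ sols, p.1 ≤ p.2) →
    ∃ (sols' : List (Int × Int)) (s' : Int),
      (PySem.List.pyRange k (k + (m : Int))).foldl (gmcStepA (PySem.Set.ofList F) al)
          (sols, s, k - 1, PySem.List.pyGetD al (k - 1) 0)
        = (sols', s', k + (m : Int) - 1, PySem.List.pyGetD al (k + (m : Int) - 1) 0) ∧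
      (PySem.List.pyRange k (k + (m : Int))).foldl (gmcStepB L al)
          ((sols.foldl gmcArg (0, 0)).1, (sols.foldl gmcArg (0, 0)).2, s)
        = ((sols'.foldl gmcArg (0, 0)).1, (sols'.foldl gmcArg (0, 0)).2, s') ∧
      0 ≤ s' ∧ s' ≤ k + (m : Int) - 1 ∧ (∀ p ∈ sols', p.1 ≤ p.2) := by
  intro m
  induction m with
  | zero =>
    intro k s sols hk hs0 hsk hps
    refine ⟨sols, s, ?_, ?_, hs0, by omega, hps⟩
    · rw [show k + ((0 : Nat) : Int) = k by simp, PySem.List.pyRange_one_eq_nil le_rfl]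
      simp
    · rw [show k + ((0 : Nat) : Int) = k by simp, PySem.List.pyRange_one_eq_nil le_rfl]
      simp
  | succ m ih =>
    intro k s sols hk hs0 hsk hps
    have hcons : PySem.List.pyRange k (k + ((m + 1 : Nat) : Int))
        = k :: PySem.List.pyRange (k + 1) ((k + 1) + (m : Int)) := by
      have hb : k + ((m + 1 : Nat) : Int) = (k + 1) + (m : Int) := by push_cast; omega
      rw [hb, PySem.List.pyRange_one_cons (by omega)]
    have hend : k + ((m + 1 : Nat) : Int) - 1 = (k + 1) + (m : Int) - 1 := by push_cast; omega
    rw [hcons, hend, List.foldl_cons, List.foldl_cons]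
    by_cases hC : ((PySem.List.bisectRight L (PySem.List.pyGetD al (k - 1) 0) : Nat) : Int) < (L.length : Int) ∧
        PySem.List.pyGetD L ((PySem.List.bisectRight L (PySem.List.pyGetD al (k - 1) 0) : Nat) : Int) 0
          < PySem.List.pyGetD al k 0
    · have hCA : (PySem.List.pyRange (PySem.List.pyGetD al (k - 1) 0 + 1) (PySem.List.pyGetD al k 0)).any
          (fun u => PySem.Set.contains (PySem.Set.ofList F) u) = true :=
        (gmc_break_iff F L _ _ hs hm).mpr hC
      have hA : gmcStepA (PySem.Set.ofList F) al (sols, s, k - 1, PySem.List.pyGetD al (k - 1) 0) k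
          = (sols ++ [(s, k - 1)], k, k, PySem.List.pyGetD al k 0) := by
        simp only [gmcStepA, hCA, if_true]
      have hB : gmcStepB L al ((sols.foldl gmcArg (0, 0)).1, (sols.foldl gmcArg (0, 0)).2, s) k
          = (((sols ++ [(s, k - 1)]).foldl gmcArg (0, 0)).1,
             ((sols ++ [(s, k - 1)]).foldl gmcArg (0, 0)).2, k) := by
        rw [List.foldl_append, List.foldl_cons, List.foldl_nil]
        simp only [gmcStepB, gmcArg]
        rw [if_pos hC]
        split_ifs with h <;> rfl
      rw [hA, hB]
      have h1k : k ≤ (k + 1) - 1 := by omega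
      obtain ⟨sols', s', h1, h2, h3, h4, h5⟩ := ih (k + 1) k (sols ++ [(s, k - 1)])
        (by omega) (by omega) h1k
        (by intro p hp
            rcases List.mem_append.mp hp with h | h
            · exact hps p h
            · simp at h; subst h; simpa using hsk)
      refine ⟨sols', s', ?_, ?_, h3, by omega, h5⟩
      · rw [show (k + 1) - 1 = k by omega] at h1
        exact h1
      · exact h2
    · have hCA : (PySem.List.pyRange (PySem.List.pyGetD al (k - 1) 0 + 1) (PySem.List.pyGetD al k 0)).any
          (fun u => PySem.Set.contains (PySem.Set.ofList F) u) = false := by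
        rw [Bool.eq_false_iff]
        exact fun h => hC ((gmc_break_iff F L _ _ hs hm).mp h)
      have hA : gmcStepA (PySem.Set.ofList F) al (sols, s, k - 1, PySem.List.pyGetD al (k - 1) 0) k
          = (sols, s, k, PySem.List.pyGetD al k 0) := by
        simp only [gmcStepA, hCA, Bool.false_eq_true, if_false]
      have hB : gmcStepB L al ((sols.foldl gmcArg (0, 0)).1, (sols.foldl gmcArg (0, 0)).2, s) k
          = ((sols.foldl gmcArg (0, 0)).1, (sols.foldl gmcArg (0, 0)).2, s) := by
        simp only [gmcStepB]
        rw [if_neg hC]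
      rw [hA, hB]
      obtain ⟨sols', s', h1, h2, h3, h4, h5⟩ := ih (k + 1) s sols
        (by omega) hs0 (by omega) hps
      refine ⟨sols', s', ?_, h2, h3, by omega, h5⟩
      rw [show (k + 1) - 1 = k by omega] at h1
      exact h1

-- A's enumerate/longest selection is the right-most-tie fold gmcArg
lemma gmc_sel (rest : List (Int × Int)) :
    ∀ (pref : List (Int × Int)) (b : Int × Int) (jb : Nat),
    (∀ p ∈ rest, p.1 ≤ p.2) → b.1 ≤ b.2 → pref[jb]? = some b →
    ∃ j' : Nat,
      (PySem.List.enumerate rest (pref.length : Int)).foldl gmcSelStep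
          (b.2 - b.1, some (jb : Int))
        = ((rest.foldl gmcArg b).2 - (rest.foldl gmcArg b).1, some ((j' : Nat) : Int)) ∧
      (pref ++ rest)[j']? = some (rest.foldl gmcArg b) := by
  induction rest with
  | nil =>
    intro pref b jb _ _ hpref
    exact ⟨jb, by simp [PySem.List.enumerate], by simpa using hpref⟩
  | cons p t ih =>
    intro pref b jb hps hb hpref
    have hjb : jb < pref.length := (List.getElem?_eq_some_iff.mp hpref).1
    rw [PySem.List.enumerate_cons, List.foldl_cons]
    have hlen1 : (pref.length : Int) + 1 = ((pref ++ [p]).length : Int) := by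
      simp
    by_cases h : p.2 - p.1 ≥ b.2 - b.1
    · have hstep : gmcSelStep (b.2 - b.1, some (jb : Int)) ((pref.length : Int), p)
          = (p.2 - p.1, some ((pref.length : Nat) : Int)) := by
        simp [gmcSelStep, h]
      have harg : gmcArg b p = p := by simp [gmcArg, h]
      rw [hstep, List.foldl_cons, harg, hlen1]
      obtain ⟨j', h1, h2⟩ := ih (pref ++ [p]) p pref.length
        (fun q hq => hps q (List.mem_cons_of_mem _ hq)) (hps p (List.mem_cons_self))
        (by simp)
      refine ⟨j', h1, ?_⟩
      rwa [List.append_assoc, List.singleton_append] at h2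
    · have hstep : gmcSelStep (b.2 - b.1, some (jb : Int)) ((pref.length : Int), p)
          = (b.2 - b.1, some ((jb : Nat) : Int)) := by
        simp [gmcSelStep, h]
      have harg : gmcArg b p = b := by simp [gmcArg, h]
      rw [hstep, List.foldl_cons, harg, hlen1]
      obtain ⟨j', h1, h2⟩ := ih (pref ++ [p]) b jb
        (fun q hq => hps q (List.mem_cons_of_mem _ hq)) hb
        (by rw [List.getElem?_append_left hjb]; exact hpref)
      refine ⟨j', h1, ?_⟩
      rwa [List.append_assoc, List.singleton_append] at h2

lemma gmc_sel_top (sols : List (Int × Int)) (h : ∀ p ∈ sols, p.1 ≤ p.2) (hne : sols ≠ []) :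
    ∃ j' : Nat,
      (PySem.List.enumerate sols).foldl gmcSelStep (-1, none)
        = ((sols.foldl gmcArg (0, 0)).2 - (sols.foldl gmcArg (0, 0)).1, some ((j' : Nat) : Int)) ∧
      sols[j']? = some (sols.foldl gmcArg (0, 0)) := by
  obtain ⟨p, t, rfl⟩ := List.exists_cons_of_ne_nil hne
  have hp : p.1 ≤ p.2 := h p List.mem_cons_self
  have h0 : gmcArg (0, 0) p = p := by simp [gmcArg]; omega
  have hstep : gmcSelStep (-1, none) ((0 : Int), p) = (p.2 - p.1, some ((0 : Nat) : Int)) := by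
    simp [gmcSelStep]; omega
  rw [PySem.List.enumerate_cons, List.foldl_cons, List.foldl_cons, h0, hstep]
  obtain ⟨j', h1, h2⟩ := gmc_sel t [p] p 0
    (fun q hq => h q (List.mem_cons_of_mem _ hq)) hp (by simp)
  exact ⟨j', by simpa using h1, by simpa using h2⟩

-- ===== VERDICT (by name: the statement is the Claim_ definition above) =====
theorem get_max_contiguous_spec : Claim_equal_get_max_contiguous := by
  intro alignment alignments _
  unfold Spec_get_max_contiguous get_max_contiguous get_max_contiguous_alt
  by_cases hnil : alignment = []
  · simp [hnil]
  · simp only [if_neg hnil]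
    set L0 := PySem.List.sorted alignment (fun x => x) false with hL0
    by_cases hr : PySem.List.pyGetD L0 (-1) 0 - PySem.List.pyGetD L0 0 0 > (L0.length : Int) - 1
    · rw [if_neg (not_not_intro hr), if_neg (not_le.mpr hr)]
      set F := alignments.flatten with hF
      set L := PySem.List.sorted (PySem.Set.ofList F) (fun x => x) false with hL
      have hsrt : L.Pairwise (· ≤ ·) := by
        have := PySem.List.sorted_pairwise (PySem.Set.ofList F) (fun x => x)
        simpa using this
      have hmm : ∀ x, x ∈ L ↔ x ∈ F := fun x => by
        rw [hL, PySem.List.mem_sorted, PySem.Set.mem_ofList]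
      have hne : L0 ≠ [] := by
        rw [hL0]
        intro h
        exact hnil ((PySem.List.sorted_eq_nil_iff _ _ _).mp h)
      have hlen : 1 ≤ L0.length := List.length_pos_of_ne_nil hne
      have hcast : (L0.length : Int) = 1 + ((L0.length - 1 : Nat) : Int) := by omega
      rw [hcast]
      obtain ⟨sols', s', hA, hB, hs0, hs1, hps⟩ :=
        gmc_loop L0 L F hsrt hmm (L0.length - 1) 1 0 [] le_rfl le_rfl (by omega) (by simp)
      have he : (1 : Int) + ((L0.length - 1 : Nat) : Int) - 1 = ((L0.length - 1 : Nat) : Int) := by omega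
      rw [show (1 : Int) - 1 = 0 by norm_num, he] at hA
      simp only [List.foldl_nil] at hB
      rw [he] at hs1
      rw [hA, he, hB]
      dsimp only
      have hpairs : ∀ p ∈ sols' ++ [(s', ((L0.length - 1 : Nat) : Int))], p.1 ≤ p.2 := by
        intro p hp
        rcases List.mem_append.mp hp with h | h
        · exact hps p h
        · simp at h; subst h; simpa using hs1
      obtain ⟨j', hfin, hget⟩ := gmc_sel_top _ hpairs (by simp)
      rw [hfin]
      simp only [PySem.List.pyGetD_natCast, List.getD_eq_getElem?_getD, hget, Option.getD_some]
      rw [List.foldl_append, List.foldl_cons, List.foldl_nil]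
      unfold gmcArg
      split_ifs with h <;> rfl
    · rw [if_pos hr, if_pos (not_lt.mp hr)]
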